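-- pv_equiv track=rewrite | github.com/AkarshJohanDsouza/LL_Parser | maketableak.py | mkdic
-- ===== SOURCE A (Python) =====
-- def mkdic(grammar):
-- 	gdict= {}
-- 	for i in grammar:
-- 		prod=i.split("->")
-- 		if(prod[0] in gdict.keys()):
-- 			gdict[prod[0]].append(prod[1])
-- 		else:
-- 			gdict[prod[0]]=[prod[1]]
-- 	return gdict
-- ===== SOURCE B (Python) =====
-- def mkdic(grammar):
-- 	pairs = [(p[0], p[1]) for p in (i.split("->") for i in grammar)]
-- 	return {k: [v for k2, v in pairs if k2 == k]
-- 	        for k in dict.fromkeys(k for k, _ in pairs)}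
-- ===== Notes on version B (the rewrite author's own statement) =====
-- stated objective: alternative
-- what changed: Replaces A's single-pass loop that branches on key presence and mutates growing lists inside a dict by a two-phase computation: split all productions once into (lhs, rhs) pairs, take the ordered deduplication of the left-hand sides, and build each key's value list in one comprehension filtering the pair list.
import Mathlib
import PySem

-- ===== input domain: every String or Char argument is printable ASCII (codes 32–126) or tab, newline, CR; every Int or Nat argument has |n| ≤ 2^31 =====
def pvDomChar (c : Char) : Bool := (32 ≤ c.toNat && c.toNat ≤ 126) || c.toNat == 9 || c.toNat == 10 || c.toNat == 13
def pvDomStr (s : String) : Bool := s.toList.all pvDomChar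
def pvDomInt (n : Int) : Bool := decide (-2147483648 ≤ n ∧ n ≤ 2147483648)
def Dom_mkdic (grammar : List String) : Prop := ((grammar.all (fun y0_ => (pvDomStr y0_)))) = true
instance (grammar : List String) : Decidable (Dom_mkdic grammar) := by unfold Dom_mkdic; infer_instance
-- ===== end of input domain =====

-- B replaces A's incremental append-or-insert dict loop by a two-phase computation
-- (split once into pairs, dedup the left-hand sides in order, one filter per key);
-- same return value on every input where A returns (Pre_ excludes productions without "->").


-- ===== PORT A =====
-- i.split("->") (sep nonempty, so split? is always `some`; getD [] never fires)
def mkdic (grammar : List String) : List (String × List String) :=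
  (grammar.foldl
    (fun (gdict : PySem.Dict String (List String)) i =>
      let prod := (PySem.Str.split? i "->").getD []
      if gdict.contains (PySem.List.pyGetD prod 0 "") then
        gdict.modify (PySem.List.pyGetD prod 0 "") [] (fun l => l ++ [PySem.List.pyGetD prod 1 ""])
      else
        gdict.insert (PySem.List.pyGetD prod 0 "") [PySem.List.pyGetD prod 1 ""])
    PySem.Dict.empty).items

-- ===== PORT B =====
-- pairs = [(p[0], p[1]) …]; dict.fromkeys = PySem.List.dedup; one filter per distinct key
def mkdic_alt (grammar : List String) : List (String × List String) :=
  let pairs := grammar.map (fun i =>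
    let p := (PySem.Str.split? i "->").getD []
    (PySem.List.pyGetD p 0 "", PySem.List.pyGetD p 1 ""))
  (PySem.List.dedup (pairs.map (fun p => p.1))).map
    (fun k => (k, (pairs.filter (fun p => p.1 == k)).map (fun p => p.2)))

-- ===== PRECONDITION & SPEC =====
-- Pre_ excludes exactly the productions with no "->": there prod[1] raises IndexError in both A and B.
def Pre_mkdic (grammar : List String) : Prop :=
  ∀ s ∈ grammar, 2 ≤ ((PySem.Str.split? s "->").getD []).length
instance (grammar : List String) : Decidable (Pre_mkdic grammar) := by unfold Pre_mkdic; infer_instance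
def pvWitness_mkdic : List String := ["S->aA", "S->b", "A->c"]
def Spec_mkdic (grammar : List String) (out : List (String × List String)) : Prop := out = mkdic_alt grammar
instance (grammar : List String) (out : List (String × List String)) : Decidable (Spec_mkdic grammar out) := by unfold Spec_mkdic; infer_instance

-- ===== CLAIM (what is proved, stated in full; the proofs are below) =====
def Claim_equal_mkdic : Prop := ∀ (grammar : List String), Dom_mkdic grammar → Pre_mkdic grammar → Spec_mkdic grammar (mkdic grammar)

-- ===== LEMMAS AND PROOFS =====

-- A's loop body always equals `d[k] = d.get(k, []) + [v]` (when the key is absent, getD gives []).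
theorem pv_step_eq (d : PySem.Dict String (List String)) (k : String) (v : String) :
    (if d.contains k then d.modify k [] (fun l => l ++ [v]) else d.insert k [v])
      = d.modify k [] (fun l => l ++ [v]) := by
  by_cases h : d.contains k
  · simp [h]
  · simp only [Bool.not_eq_true] at h
    simp [h, PySem.Dict.modify, PySem.Dict.getD_of_not_contains _ _ h]

-- the grouping fold over (key, value) pairs produces exactly B's dedup-then-filter shape
theorem pv_group_eq (ps : List (String × String)) :
    (ps.foldl (fun (d : PySem.Dict String (List String)) p =>
        d.modify p.1 [] (fun l => l ++ [p.2])) PySem.Dict.empty).items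
      = (PySem.List.dedup (ps.map (fun p => p.1))).map
          (fun k => (k, (ps.filter (fun p => p.1 == k)).map (fun p => p.2))) := by
  set F := ps.foldl (fun (d : PySem.Dict String (List String)) p =>
      d.modify p.1 [] (fun l => l ++ [p.2])) PySem.Dict.empty with hF
  have hkeys : F.keys = PySem.List.dedup (ps.map (fun p => p.1)) := by
    rw [hF, PySem.Dict.keys_foldl_modify_key ps Prod.fst [] (fun _ p l => l ++ [p.2]),
        PySem.List.dedup_eq_ofList]
    simp [PySem.Set.ofList, PySem.Set.update]
  have hnd : F.keys.Nodup := by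
    rw [hF]
    exact PySem.Dict.nodup_keys_foldl_modify_key ps Prod.fst [] (fun _ p l => l ++ [p.2])
      PySem.Dict.empty (by simp)
  rw [PySem.Dict.items_eq_map_keys F hnd [], hkeys]
  refine List.map_congr_left (fun k _ => ?_)
  rw [hF, PySem.Dict.getD_foldl_modify_append ps PySem.Dict.empty k]
  simp

theorem mkdic_eq_alt (grammar : List String) : mkdic grammar = mkdic_alt grammar := by
  unfold mkdic mkdic_alt
  rw [show (fun (gdict : PySem.Dict String (List String)) i =>
        let prod := (PySem.Str.split? i "->").getD []
        if gdict.contains (PySem.List.pyGetD prod 0 "") then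
          gdict.modify (PySem.List.pyGetD prod 0 "") [] (fun l => l ++ [PySem.List.pyGetD prod 1 ""])
        else
          gdict.insert (PySem.List.pyGetD prod 0 "") [PySem.List.pyGetD prod 1 ""])
      = (fun (gdict : PySem.Dict String (List String)) i =>
          let p := (PySem.Str.split? i "->").getD []
          gdict.modify (PySem.List.pyGetD p 0 "") [] (fun l => l ++ [PySem.List.pyGetD p 1 ""]))
    from funext fun d => funext fun i => pv_step_eq d _ _]
  rw [show (grammar.foldl (fun (gdict : PySem.Dict String (List String)) i =>
          let p := (PySem.Str.split? i "->").getD []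
          gdict.modify (PySem.List.pyGetD p 0 "") [] (fun l => l ++ [PySem.List.pyGetD p 1 ""]))
        PySem.Dict.empty)
      = ((grammar.map (fun i =>
            let p := (PySem.Str.split? i "->").getD []
            (PySem.List.pyGetD p 0 "", PySem.List.pyGetD p 1 ""))).foldl
          (fun (d : PySem.Dict String (List String)) p =>
            d.modify p.1 [] (fun l => l ++ [p.2])) PySem.Dict.empty)
    from by rw [List.foldl_map]]
  exact pv_group_eq _

-- ===== VERDICT (by name: the statement is the Claim_ definition above) =====
theorem mkdic_spec : Claim_equal_mkdic := by
  intro grammar _ _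
  unfold Spec_mkdic
  exact mkdic_eq_alt grammar
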